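-- pv_equiv track=rewrite | github.com/Samagoue/MQ_test1 | utils/confluence_shim.py | _expand_csv_row
-- ===== SOURCE A (Python) =====
-- from typing import Optional, List, Dict, Any
--
-- def _expand_csv_row(headers: List[str], row: List[str]) -> List[Dict[str, str]]:
--     """Expand a row with comma-delimited cell values into multiple rows.
--
--     If any cell contains commas, it is split and a separate row is
--     produced for each value.  Non-comma cells are duplicated across all
--     expanded rows.  When multiple cells contain commas, the cartesian
--     product is produced.
--
--     Examples::
--
--         headers: ["QmgrName", "Application"]
--         row:     ["QM_01, QM_02, QM_03", "MyApp"]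
--         result:  [{"QmgrName": "QM_01", "Application": "MyApp"},
--                   {"QmgrName": "QM_02", "Application": "MyApp"},
--                   {"QmgrName": "QM_03", "Application": "MyApp"}]
--     """
--     from itertools import product
--
--     split_values = []
--     for val in row:
--         if "," in val:
--             split_values.append([v.strip() for v in val.split(",") if v.strip()])
--         else:
--             split_values.append([val])
--
--     rows = []
--     for combo in product(*split_values):
--         rows.append(dict(zip(headers, combo)))
--     return rows
-- ===== SOURCE B (Python) =====
-- from typing import List, Dict
--
-- def _expand_csv_row(headers: List[str], row: List[str]) -> List[Dict[str, str]]: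
--     """Expand a row with comma-delimited cell values into multiple rows.
--
--     Same splitting of cells as the original, but the cartesian product is
--     built incrementally with a fold over nested pairs (shared tails),
--     flattened only when each output row is materialised.
--     """
--     split_values = []
--     for val in row:
--         if "," in val:
--             split_values.append([v.strip() for v in val.split(",") if v.strip()])
--         else:
--             split_values.append([val])
--
--     combos = [()]  # each combo is () or a nested pair (prefix, value)
--     for values in split_values:
--         combos = [(c, v) for c in combos for v in values]
--
--     def _flat(c):
--         out = []
--         while c != ():
--             c, v = c
--             out.append(v)
--         out.reverse()
--         return out
--
--     return [dict(zip(headers, _flat(c))) for c in combos]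
-- ===== Notes on version B (the rewrite author's own statement) =====
-- stated objective: alternative
-- what changed: Replaces itertools.product with an incremental fold that extends a list of partial combos (nested pairs with shared tails, flattened per output row) one cell at a time.
import Mathlib
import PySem

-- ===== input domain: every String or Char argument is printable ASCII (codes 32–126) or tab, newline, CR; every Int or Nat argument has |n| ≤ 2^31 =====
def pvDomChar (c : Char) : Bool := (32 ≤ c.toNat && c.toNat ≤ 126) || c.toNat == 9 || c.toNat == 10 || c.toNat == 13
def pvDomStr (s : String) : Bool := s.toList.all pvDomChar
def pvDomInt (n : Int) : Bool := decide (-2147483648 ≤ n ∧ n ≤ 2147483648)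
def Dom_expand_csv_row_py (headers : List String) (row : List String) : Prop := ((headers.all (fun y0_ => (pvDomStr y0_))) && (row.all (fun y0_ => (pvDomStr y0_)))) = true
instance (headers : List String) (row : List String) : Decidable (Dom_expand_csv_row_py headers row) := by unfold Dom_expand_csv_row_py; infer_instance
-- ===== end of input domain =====

-- B replaces itertools.product with an incremental fold over the split cells; same results, similar cost (objective: alternative).

-- shared helper: the cell-splitting step both Pythons perform identically
-- (A's and B's first loops are the same code)
def pvSplitCell (val : String) : List String :=
  if PySem.Str.isIn "," val then
    (((PySem.Str.split? val ",").getD []).map PySem.Str.strip).filter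
      (fun v => PySem.Str.len v ≠ 0)
  else [val]

-- dict(zip(headers, combo)) as an insertion-ordered assoc list
def pvDictZip (headers : List String) (combo : List String) : List (String × String) :=
  (PySem.Dict.ofList (headers.zip combo)).items

-- ===== PORT A =====
-- itertools.product(*split_values), leftmost factor varying slowest
def pvProduct : List (List String) → List (List String)
  | [] => [[]]
  | l :: ls => l.flatMap (fun x => (pvProduct ls).map (fun c => x :: c))

def expand_csv_row_py (headers : List String) (row : List String) : List (List (String × String)) :=
  let split_values := row.map pvSplitCell
  (pvProduct split_values).map (fun combo => pvDictZip headers combo)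

-- ===== PORT B =====
-- B's combos are nested pairs (prefix, value) sharing tails; a nested pair chain
-- IS a reversed cons-list, so it is ported as List String built with cons, and
-- B's _flat (unwind then reverse) is List.reverse.
def expand_csv_row_py_alt (headers : List String) (row : List String) : List (List (String × String)) :=
  let split_values := row.map pvSplitCell
  let combos := split_values.foldl
      (fun cs l => cs.flatMap (fun c => l.map (fun v => v :: c))) [[]]
  combos.map (fun combo => pvDictZip headers combo.reverse)

-- ===== PRECONDITION & SPEC =====
def Spec_expand_csv_row_py (headers : List String) (row : List String) (out : List (List (String × String))) : Prop := out = expand_csv_row_py_alt headers row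
instance (headers : List String) (row : List String) (out : List (List (String × String))) : Decidable (Spec_expand_csv_row_py headers row out) := by unfold Spec_expand_csv_row_py; infer_instance

-- ===== CLAIM (what is proved, stated in full; the proofs are below) =====
def Claim_equal_expand_csv_row_py : Prop := ∀ (headers : List String) (row : List String), Dom_expand_csv_row_py headers row → Spec_expand_csv_row_py headers row (expand_csv_row_py headers row)

-- ===== LEMMAS AND PROOFS =====

-- B's fold, started from any accumulator, computes A's product (reversed) prepended to each accumulated suffix
theorem pvFoldl_product (ls : List (List String)) (acc : List (List String)) :
    ls.foldl (fun cs l => cs.flatMap (fun c => l.map (fun v => v :: c))) acc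
      = acc.flatMap (fun c => (pvProduct ls).map (fun w => w.reverse ++ c)) := by
  induction ls generalizing acc with
  | nil => simp [pvProduct]
  | cons l ls ih =>
      rw [List.foldl_cons, ih]
      simp [pvProduct, List.flatMap_assoc, List.map_flatMap, List.flatMap_map,
        List.map_map, Function.comp_def, List.append_assoc]

theorem pvFold_eq_product (ls : List (List String)) :
    ls.foldl (fun cs l => cs.flatMap (fun c => l.map (fun v => v :: c))) [[]]
      = (pvProduct ls).map List.reverse := by
  rw [pvFoldl_product]; simp

-- ===== VERDICT (by name: the statement is the Claim_ definition above) =====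
theorem expand_csv_row_py_spec : Claim_equal_expand_csv_row_py := by
  intro headers row _
  unfold Spec_expand_csv_row_py expand_csv_row_py expand_csv_row_py_alt
  simp only [pvFold_eq_product, List.map_map, Function.comp_def, List.reverse_reverse]
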